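-- pv_equiv track=rewrite | github.com/Djura94/MIca | igra.py | removePiece
-- ===== SOURCE A (Python) =====
-- import copy
--
-- def isMill(player, board, position1, position2):
--     if (board[position1] == player) and (board[position2] == player):
--         return True
--     return False
--
-- def player_have_mill(position, board):
--     player = board[position]
--     if player != "X":
--         return haveBoardMill(position, board, player)
--     return False
--
-- def haveBoardMill(position, board, player):
--     mill = [
--         (isMill(player, board, 1, 2) or isMill(player, board, 3, 5)),
--         (isMill(player, board, 0, 2) or isMill(player, board, 9, 17)),
--         (isMill(player, board, 0, 1) or isMill(player, board, 4, 7)),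
--         (isMill(player, board, 0, 5) or isMill(player, board, 11, 19)),
--         (isMill(player, board, 2, 7) or isMill(player, board, 12, 20)),
--         (isMill(player, board, 0, 3) or isMill(player, board, 6, 7)),
--         (isMill(player, board, 5, 7) or isMill(player, board, 14, 22)),
--         (isMill(player, board, 2, 4) or isMill(player, board, 5, 6)),
--         (isMill(player, board, 9, 10) or isMill(player, board, 11, 13)),
--         (isMill(player, board, 8, 10) or isMill(player, board, 1, 17)),
--         (isMill(player, board, 8, 9) or isMill(player, board, 12, 15)),
--         (isMill(player, board, 3, 19) or isMill(player, board, 8, 13)),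
--         (isMill(player, board, 20, 4) or isMill(player, board, 10, 15)),
--         (isMill(player, board, 8, 11) or isMill(player, board, 14, 15)),
--         (isMill(player, board, 13, 15) or isMill(player, board, 6, 22)),
--         (isMill(player, board, 13, 14) or isMill(player, board, 10, 12)),
--         (isMill(player, board, 17, 18) or isMill(player, board, 19, 21)),
--         (isMill(player, board, 1, 9) or isMill(player, board, 16, 18)),
--         (isMill(player, board, 16, 17) or isMill(player, board, 20, 23)),
--         (isMill(player, board, 16, 21) or isMill(player, board, 3, 11)),
--         (isMill(player, board, 12, 4) or isMill(player, board, 18, 23)),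
--         (isMill(player, board, 16, 19) or isMill(player, board, 22, 23)),
--         (isMill(player, board, 6, 14) or isMill(player, board, 21, 23)),
--         (isMill(player, board, 18, 20) or isMill(player, board, 21, 22)),
--     ]
--     return mill[position]
--
-- def removePiece(board_copy, board_list):
--     for piece in range(len(board_copy)):
--         if board_copy[piece] == "2":
--             if not player_have_mill(piece, board_copy):
--                 new_board = copy.deepcopy(board_copy)
--                 new_board[piece] = "X"
--                 board_list.append(new_board)
--     return board_list
-- ===== SOURCE B (Python) =====
-- MILLS = [
--     (0, 1, 2), (2, 4, 7), (4, 12, 20), (8, 9, 10), (1, 9, 17), (16, 17, 18),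
--     (16, 19, 21), (0, 3, 5), (3, 11, 19), (8, 11, 13), (13, 14, 15), (5, 6, 7),
--     (6, 14, 22), (10, 12, 15), (18, 20, 23), (21, 22, 23),
-- ]
--
-- def removePiece(board_copy, board_list):
--     for piece, cell in enumerate(board_copy):
--         if cell == "2" and not any(
--             piece in line and all(board_copy[j] == "2" for j in line)
--             for line in MILLS
--         ):
--             new_board = list(board_copy)
--             new_board[piece] = "X"
--             board_list.append(new_board)
--     return board_list
-- ===== Notes on version B (the rewrite author's own statement) =====
-- stated objective: simpler
-- what changed: Replaces the 24-entry per-position hardcoded partner-pair table (isMill/player_have_mill/haveBoardMill) with a single list of the 16 mill lines and an any/all membership scan per piece, copying via list() instead of deepcopy.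
import Mathlib
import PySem

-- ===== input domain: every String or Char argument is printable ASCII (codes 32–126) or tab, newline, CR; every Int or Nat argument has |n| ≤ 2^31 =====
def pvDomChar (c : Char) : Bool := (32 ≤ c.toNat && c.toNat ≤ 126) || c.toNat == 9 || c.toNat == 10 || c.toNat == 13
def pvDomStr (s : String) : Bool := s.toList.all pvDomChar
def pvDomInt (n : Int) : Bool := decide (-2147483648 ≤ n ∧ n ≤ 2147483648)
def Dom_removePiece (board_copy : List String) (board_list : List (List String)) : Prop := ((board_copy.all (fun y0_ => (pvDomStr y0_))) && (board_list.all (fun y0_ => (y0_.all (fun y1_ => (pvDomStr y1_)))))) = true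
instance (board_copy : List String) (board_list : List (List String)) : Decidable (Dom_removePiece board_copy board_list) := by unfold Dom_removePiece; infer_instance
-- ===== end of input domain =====

-- B replaces A's 24-entry per-position hardcoded partner-pair table with a single 16-line mill
-- list scanned by membership (objective: simpler; same cost). Both A and B append to board_list
-- in place; the equivalence proved is about the returned value (the same appended list).


-- ===== PORT A =====
def isMillA (player : String) (board : List String) (position1 position2 : Int) : Bool :=
  (PySem.List.pyGet? board position1 == some player) && (PySem.List.pyGet? board position2 == some player)

-- mill[position]: pyGet? is none exactly where Python raises IndexError; those inputs are outside Pre_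
def haveBoardMillA (position : Int) (board : List String) (player : String) : Bool :=
  let mill : List Bool := [
    (isMillA player board 1 2 || isMillA player board 3 5),
    (isMillA player board 0 2 || isMillA player board 9 17),
    (isMillA player board 0 1 || isMillA player board 4 7),
    (isMillA player board 0 5 || isMillA player board 11 19),
    (isMillA player board 2 7 || isMillA player board 12 20),
    (isMillA player board 0 3 || isMillA player board 6 7),
    (isMillA player board 5 7 || isMillA player board 14 22),
    (isMillA player board 2 4 || isMillA player board 5 6),
    (isMillA player board 9 10 || isMillA player board 11 13),
    (isMillA player board 8 10 || isMillA player board 1 17),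
    (isMillA player board 8 9 || isMillA player board 12 15),
    (isMillA player board 3 19 || isMillA player board 8 13),
    (isMillA player board 20 4 || isMillA player board 10 15),
    (isMillA player board 8 11 || isMillA player board 14 15),
    (isMillA player board 13 15 || isMillA player board 6 22),
    (isMillA player board 13 14 || isMillA player board 10 12),
    (isMillA player board 17 18 || isMillA player board 19 21),
    (isMillA player board 1 9 || isMillA player board 16 18),
    (isMillA player board 16 17 || isMillA player board 20 23),
    (isMillA player board 16 21 || isMillA player board 3 11),
    (isMillA player board 12 4 || isMillA player board 18 23),
    (isMillA player board 16 19 || isMillA player board 22 23),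
    (isMillA player board 6 14 || isMillA player board 21 23),
    (isMillA player board 18 20 || isMillA player board 21 22)]
  (PySem.List.pyGet? mill position).getD false

def player_have_millA (position : Int) (board : List String) : Bool :=
  match PySem.List.pyGet? board position with
  | some player => if player != "X" then haveBoardMillA position board player else false
  | none => false

def removePiece (board_copy : List String) (board_list : List (List String)) : List (List String) :=
  (PySem.List.pyRange 0 board_copy.length 1).foldl (fun acc piece =>
    if PySem.List.pyGet? board_copy piece == some "2" then
      if !player_have_millA piece board_copy then
        acc ++ [PySem.List.pySetD board_copy piece "X"]
      else acc
    else acc) board_list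

-- ===== PORT B =====
def MILLS : List (List Int) :=
  [[0, 1, 2], [2, 4, 7], [4, 12, 20], [8, 9, 10], [1, 9, 17], [16, 17, 18],
   [16, 19, 21], [0, 3, 5], [3, 11, 19], [8, 11, 13], [13, 14, 15], [5, 6, 7],
   [6, 14, 22], [10, 12, 15], [18, 20, 23], [21, 22, 23]]

def removePiece_alt (board_copy : List String) (board_list : List (List String)) : List (List String) :=
  (PySem.List.enumerate board_copy).foldl (fun acc p =>
    if p.2 == "2" &&
       !(MILLS.any (fun line =>
          line.contains p.1 && line.all (fun j => PySem.List.pyGet? board_copy j == some "2"))) then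
      acc ++ [PySem.List.pySetD board_copy p.1 "X"]
    else acc) board_list

-- ===== PRECONDITION & SPEC =====
-- Pre_ excludes boards on which a "2" piece makes A read the 24-entry mill table or a board cell
-- out of range (a "2" at index ≥ 24, or a board shorter than 24 containing "2"): A raises
-- IndexError on almost all of these; the few short boards that dodge every out-of-range read via
-- and/or short-circuiting are excluded with them (see the cite in the claim).
def Pre_removePiece (board_copy : List String) (board_list : List (List String)) : Prop :=
  "2" ∉ board_copy.drop 24 ∧ ("2" ∈ board_copy → 24 ≤ board_copy.length)
instance (board_copy : List String) (board_list : List (List String)) : Decidable (Pre_removePiece board_copy board_list) := by unfold Pre_removePiece; infer_instance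

def pvWitness_removePiece : List String × List (List String) :=
  (["2", "1", "X", "X", "1", "X", "X", "X", "2", "2", "2", "X",
    "X", "X", "X", "X", "1", "1", "1", "X", "X", "X", "X", "X"], [])

def Spec_removePiece (board_copy : List String) (board_list : List (List String)) (out : List (List String)) : Prop := out = removePiece_alt board_copy board_list
instance (board_copy : List String) (board_list : List (List String)) (out : List (List String)) : Decidable (Spec_removePiece board_copy board_list out) := by unfold Spec_removePiece; infer_instance

-- ===== CLAIM (what is proved, stated in full; the proofs are below) =====
def Claim_equal_removePiece : Prop := ∀ (board_copy : List String) (board_list : List (List String)), Dom_removePiece board_copy board_list → Pre_removePiece board_copy board_list → Spec_removePiece board_copy board_list (removePiece board_copy board_list)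

-- ===== LEMMAS AND PROOFS =====

-- For a position k < 24 holding "2", A's table entry equals B's scan over the mill lines.
set_option maxHeartbeats 2000000 in
theorem mill_eq (bc : List String) (k : Nat) (hk : k < 24)
    (h2 : PySem.List.pyGet? bc (k : Int) = some "2") :
    haveBoardMillA (k : Int) bc "2"
      = MILLS.any (fun line =>
          line.contains (k : Int) && line.all (fun j => PySem.List.pyGet? bc j == some "2")) := by
  interval_cases k <;> simp_all [haveBoardMillA, isMillA, MILLS] <;> rw [Bool.and_comm]

-- The per-piece conditions of the two loops agree on every in-range index, under Pre_.
theorem cond_eq (bc : List String) (hdrop : "2" ∉ bc.drop 24) (hlen : "2" ∈ bc → 24 ≤ bc.length)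
    (j : Int) (h0 : 0 ≤ j) (hn : j < (bc.length : Int)) :
    ((PySem.List.pyGet? bc j == some "2") && !player_have_millA j bc)
      = ((PySem.List.pyGetD bc j "" == "2") &&
         !(MILLS.any (fun line =>
            line.contains j && line.all (fun i => PySem.List.pyGet? bc i == some "2")))) := by
  obtain ⟨k, rfl⟩ : ∃ k : Nat, j = (k : Int) := ⟨j.toNat, (Int.toNat_of_nonneg h0).symm⟩
  have hklen : k < bc.length := by exact_mod_cast hn
  have hget : PySem.List.pyGet? bc (k : Int) = some bc[k] := by
    rw [PySem.List.pyGet?_natCast]; simp [hklen]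
  have hgetD : PySem.List.pyGetD bc (k : Int) "" = bc[k] := by
    rw [PySem.List.pyGetD_natCast]; simp [List.getD, hklen]
  by_cases hv : bc[k] = "2"
  · have h24 : 24 ≤ bc.length := hlen (hv ▸ List.getElem_mem hklen)
    have hk24 : k < 24 := by
      by_contra hge
      refine hdrop ?_
      have h' : (bc.drop 24)[k - 24]'(by simp; omega) = bc[k] := by
        rw [List.getElem_drop]; congr 1; omega
      rw [← hv, ← h']
      exact List.getElem_mem _
    have hp : player_have_millA (k : Int) bc = haveBoardMillA (k : Int) bc "2" := by
      simp [player_have_millA, hget, hv]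
    rw [hp, mill_eq bc k hk24 (by rw [hget, hv]), hget, hgetD, hv]
    simp
  · have hx : (bc[k] == "2") = false := beq_eq_false_iff_ne.mpr hv
    simp [hget, hgetD, hx]

theorem removePiece_eq_alt (bc : List String) (bl : List (List String))
    (hdrop : "2" ∉ bc.drop 24) (hlen : "2" ∈ bc → 24 ≤ bc.length) :
    removePiece bc bl = removePiece_alt bc bl := by
  unfold removePiece removePiece_alt
  rw [PySem.List.foldl_congr_mem _ _ (fun acc piece =>
      if ((PySem.List.pyGet? bc piece == some "2") && !player_have_millA piece bc) then
        acc ++ [PySem.List.pySetD bc piece "X"] else acc) bl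
      (by intro acc x _
          by_cases h1 : PySem.List.pyGet? bc x == some "2" <;>
            by_cases h2' : player_have_millA x bc <;> simp [h1, h2'])]
  rw [PySem.List.foldl_append_if, PySem.List.foldl_append_if,
      PySem.List.enumerate_eq_map_pyRange bc "", List.filter_map, List.map_map]
  have hlb : PySem.List.len bc = (bc.length : Int) := by simp [pysem]
  rw [hlb]
  congr 1
  simp only [Function.comp_def]
  rw [List.filter_congr (fun j hj => by
    obtain ⟨h0, hn⟩ := PySem.List.mem_pyRange_one.mp hj
    exact cond_eq bc hdrop hlen j h0 hn)]

-- ===== VERDICT (by name: the statement is the Claim_ definition above) =====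
theorem removePiece_spec : Claim_equal_removePiece := by
  intro bc bl _ hpre
  show removePiece bc bl = removePiece_alt bc bl
  exact removePiece_eq_alt bc bl hpre.1 hpre.2
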